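-- pv_equiv track=rewrite | github.com/wuaodi/SpaceMind | SpaceMind_Lab/host.py | _extract_react_thought
-- ===== SOURCE A (Python) =====
-- def _extract_react_thought(content: str) -> str:
--     if not content or "Thought:" not in content:
--         return ""
--     tail = content.split("Thought:", 1)[1]
--     for marker in ("\nNext step I will", "\nObservation:", "\nAction:", "\nTool:"):
--         if marker in tail:
--             tail = tail.split(marker, 1)[0]
--     return tail.strip()
-- ===== SOURCE B (Python) =====
-- _STOPS = ("Next step I will", "Observation:", "Action:", "Tool:")
--
-- def _extract_react_thought(content: str) -> str:
--     p = content.find("Thought:")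
--     if p == -1:
--         return ""
--     tail = content[p + len("Thought:"):]
--     i = 0
--     n = len(tail)
--     while i < n:
--         if tail[i] == "\n" and tail.startswith(_STOPS, i + 1):
--             break
--         i += 1
--     return tail[:i].strip()
-- ===== Notes on version B (the rewrite author's own statement) =====
-- stated objective: alternative
-- what changed: B never splits or searches the tail per marker: it locates the header with find and then makes a single left-to-right character scan over the tail, stopping at the first newline that is followed by one of the four stop prefixes, and slices there.
import Mathlib
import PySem

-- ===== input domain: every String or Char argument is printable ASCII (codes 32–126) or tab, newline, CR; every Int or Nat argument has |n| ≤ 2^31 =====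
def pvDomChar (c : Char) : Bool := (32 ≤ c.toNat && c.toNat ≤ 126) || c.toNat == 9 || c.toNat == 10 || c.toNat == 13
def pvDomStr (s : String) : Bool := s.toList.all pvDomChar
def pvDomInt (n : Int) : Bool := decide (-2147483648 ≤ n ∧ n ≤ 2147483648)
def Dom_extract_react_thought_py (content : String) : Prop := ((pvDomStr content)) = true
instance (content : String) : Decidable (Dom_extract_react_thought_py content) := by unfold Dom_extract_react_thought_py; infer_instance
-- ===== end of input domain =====

-- B replaces A's four split passes over the tail by a single left-to-right character
-- scan that stops at the first newline followed by a stop prefix (alternative decomposition, same cost).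

-- ===== PORT A =====
def extract_react_thought_py (content : String) : String :=
  if content = "" || !(PySem.Str.isIn "Thought:" content) then ""
  else
    -- content.split("Thought:", 1)[1]  (the guard ensures index 1 exists; getD totalizes only)
    let parts := (PySem.Str.splitMax? content "Thought:" 1).getD []
    let tail := (PySem.List.pyGet? parts 1).getD ""
    let tail := ["\nNext step I will", "\nObservation:", "\nAction:", "\nTool:"].foldl
      (fun t m =>
        if PySem.Str.isIn m t then
          (PySem.List.pyGet? ((PySem.Str.splitMax? t m 1).getD []) 0).getD ""
        else t) tail
    PySem.Str.strip tail

-- ===== PORT B =====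
-- Source B's _STOPS tuple
def pvStops : List String := ["Next step I will", "Observation:", "Action:", "Tool:"]

-- Source B's while loop: advance i until tail[i] == '\n' and a stop prefix follows; returns the final i
def scanCut : List Char → Nat
  | [] => 0
  | c :: rest =>
    if c = '\n' && pvStops.any (fun s => s.toList.isPrefixOf rest) then 0
    else scanCut rest + 1

def extract_react_thought_py_alt (content : String) : String :=
  let p := PySem.Str.find content "Thought:"
  if p = -1 then ""
  else
    let tail := PySem.Str.slice content (some (p + PySem.Str.len "Thought:")) none
    let i := scanCut tail.toList
    PySem.Str.strip (PySem.Str.slice tail none (some (i : Int)))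

-- ===== PRECONDITION & SPEC =====
def Spec_extract_react_thought_py (content : String) (out : String) : Prop := out = extract_react_thought_py_alt content
instance (content : String) (out : String) : Decidable (Spec_extract_react_thought_py content out) := by unfold Spec_extract_react_thought_py; infer_instance

-- ===== CLAIM (what is proved, stated in full; the proofs are below) =====
def Claim_equal_extract_react_thought_py : Prop := ∀ (content : String), Dom_extract_react_thought_py content → Spec_extract_react_thought_py content (extract_react_thought_py content)

-- ===== LEMMAS AND PROOFS =====

/-- Index of the first occurrence of `sep` in `l` (as a prefix of a suffix), if any. -/
def firstOcc (sep : List Char) : List Char → Option Nat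
  | [] => if sep = [] then some 0 else none
  | c :: rest => if sep.isPrefixOf (c :: rest) then some 0 else (firstOcc sep rest).map (· + 1)

theorem firstOcc_eq_some_iff (sep l : List Char) (j : Nat) :
    firstOcc sep l = some j ↔ sep <+: l.drop j ∧ ∀ i < j, ¬ sep <+: l.drop i := by
  induction l generalizing j with
  | nil =>
    by_cases h : sep = []
    · subst h
      constructor
      · intro hj
        have hj0 : 0 = j := by simpa [firstOcc] using hj
        subst hj0
        exact ⟨by simp, fun i hi => absurd hi (by omega)⟩
      · rintro ⟨-, hmin⟩
        have hj0 : j = 0 := by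
          by_contra hj
          simpa using hmin 0 (by omega)
        simp [firstOcc, hj0]
    · simp [firstOcc, h]
  | cons c rest ih =>
    simp only [firstOcc]
    by_cases h : sep.isPrefixOf (c :: rest)
    · rw [List.isPrefixOf_iff_prefix] at h
      simp only [if_pos (List.isPrefixOf_iff_prefix.mpr h)]
      constructor
      · rintro hj; cases hj
        exact ⟨by simpa using h, fun i hi => by omega⟩
      · rintro ⟨_, hmin⟩
        by_contra hj
        have hj0 : 0 < j := Nat.pos_of_ne_zero (fun h0 => hj (by rw [h0]))
        exact hmin 0 hj0 (by simpa using h)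
    · rw [List.isPrefixOf_iff_prefix] at h
      simp only [if_neg (fun hp => h (List.isPrefixOf_iff_prefix.mp hp)), Option.map_eq_some_iff]
      constructor
      · rintro ⟨j', hj', rfl⟩
        obtain ⟨hpre, hmin⟩ := (ih j').mp hj'
        refine ⟨by simpa using hpre, ?_⟩
        intro i hi
        match i with
        | 0 => simpa using h
        | i' + 1 => simpa using hmin i' (by omega)
      · rintro ⟨hpre, hmin⟩
        match j with
        | 0 => exact absurd (by simpa using hpre) h
        | j' + 1 =>
          refine ⟨j', (ih j').mpr ⟨by simpa using hpre, ?_⟩, rfl⟩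
          intro i hi
          have := hmin (i + 1) (by omega)
          simpa using this

theorem firstOcc_eq_none_iff (sep l : List Char) :
    firstOcc sep l = none ↔ ∀ i, ¬ sep <+: l.drop i := by
  induction l with
  | nil =>
    simp only [firstOcc, List.drop_nil, List.prefix_nil]
    by_cases h : sep = [] <;> simp [h]
  | cons c rest ih =>
    simp only [firstOcc]
    by_cases h : sep.isPrefixOf (c :: rest)
    · rw [List.isPrefixOf_iff_prefix] at h
      simp only [if_pos (List.isPrefixOf_iff_prefix.mpr h)]
      constructor
      · intro hc; cases hc
      · intro hmin; exact absurd (by simpa using h) (hmin 0)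
    · rw [List.isPrefixOf_iff_prefix] at h
      simp only [if_neg (fun hp => h (List.isPrefixOf_iff_prefix.mp hp)), Option.map_eq_none_iff]
      rw [ih]
      constructor
      · intro hmin i
        match i with
        | 0 => simpa using h
        | i' + 1 => simpa using hmin i'
      · intro hmin i
        have := hmin (i + 1)
        simpa using this

/-- `Chars.find` computes `firstOcc`. -/
theorem find_eq_firstOcc (l sep : List Char) :
    PySem.Chars.find l sep = (match firstOcc sep l with | none => (-1 : Int) | some j => (j : Int)) := by
  cases h : firstOcc sep l with
  | none =>
    have hmin := (firstOcc_eq_none_iff sep l).mp h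
    apply (PySem.Chars.find_eq_neg_one_iff _ _).mpr
    intro hinf
    obtain ⟨j, hj⟩ := (PySem.Chars.exists_prefix_drop_iff_isIn sep l).mpr
      ((PySem.Chars.isIn_iff_infix sep l).mpr hinf)
    exact hmin j hj
  | some j =>
    obtain ⟨hpre, hmin⟩ := (firstOcc_eq_some_iff sep l j).mp h
    have hinf : sep <:+: l := (PySem.Chars.isIn_iff_infix sep l).mp
      ((PySem.Chars.exists_prefix_drop_iff_isIn sep l).mp ⟨j, hpre⟩)
    have hne : PySem.Chars.find l sep ≠ -1 := (PySem.Chars.find_ne_neg_one_iff _ _).mpr hinf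
    have hle : -1 ≤ PySem.Chars.find l sep := PySem.Chars.neg_one_le_find l sep
    have h0 : 0 ≤ PySem.Chars.find l sep := by omega
    obtain ⟨hpre', hmin'⟩ := PySem.Chars.find_spec h0
    have hj : j = (PySem.Chars.find l sep).toNat := by
      rcases Nat.lt_trichotomy j (PySem.Chars.find l sep).toNat with hlt | heq | hgt
      · exact absurd hpre (hmin' j hlt)
      · exact heq
      · exact absurd hpre' (hmin _ hgt)
    show PySem.Chars.find l sep = (j : Int)
    omega

theorem go_zero (sep l cur : List Char) (acc : List (List Char)) (fuel : Nat) :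
    PySem.Chars.splitOnMax.go sep fuel 0 l cur acc = ((cur.reverse ++ l) :: acc).reverse := by
  cases fuel <;> cases l <;> simp [PySem.Chars.splitOnMax.go]

theorem go_one (sep : List Char) (hsep : sep ≠ []) :
    ∀ (l : List Char) (fuel : Nat), l.length < fuel → ∀ (cur : List Char) (acc : List (List Char)),
    PySem.Chars.splitOnMax.go sep fuel 1 l cur acc = acc.reverse ++
      (match firstOcc sep l with
        | none => [cur.reverse ++ l]
        | some j => [cur.reverse ++ l.take j, l.drop (j + sep.length)]) := by
  intro l
  induction l with
  | nil =>
    intro fuel hf cur acc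
    match fuel, hf with
    | fuel + 1, _ =>
      simp [PySem.Chars.splitOnMax.go, firstOcc, hsep]
  | cons c rest ih =>
    intro fuel hf cur acc
    match fuel, hf with
    | fuel + 1, hf =>
      show (if sep.isPrefixOf (c :: rest) = true then
              PySem.Chars.splitOnMax.go sep fuel 0 ((c :: rest).drop sep.length) [] (cur.reverse :: acc)
            else PySem.Chars.splitOnMax.go sep fuel 1 rest (c :: cur) acc) = _
      by_cases h : sep.isPrefixOf (c :: rest)
      · rw [if_pos h, go_zero]
        simp [firstOcc, h]
      · rw [if_neg h, ih fuel (by simpa using Nat.lt_of_succ_lt_succ hf) (c :: cur) acc]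
        simp only [firstOcc, h, Bool.false_eq_true, if_false]
        cases hrest : firstOcc sep rest with
        | none => simp
        | some j => simp [List.take_succ_cons, List.drop_succ_cons, Nat.add_right_comm]

theorem splitOnMax_one (s sep : List Char) (hsep : sep ≠ []) :
    PySem.Chars.splitOnMax s sep 1 =
      (match firstOcc sep s with
        | none => [s]
        | some j => [s.take j, s.drop (j + sep.length)]) := by
  rw [PySem.Chars.splitOnMax]
  rw [if_neg (by omega)]
  have := go_one sep hsep s (s.length + 1) (by omega) [] []
  simpa using this

/-- Chars-level body of A's marker loop. -/
def stepAC (t m : List Char) : List Char :=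
  match firstOcc m t with
  | some j => t.take j
  | none => t

/-- Cut index maintained while replaying A's loop: truncate at the marker's first occurrence if it is earlier. -/
def stepN (t : List Char) (c : Nat) (m : List Char) : Nat :=
  match firstOcc m t with
  | some j => if j < c then j else c
  | none => c

theorem stepA_toList (t m : String) (hm : m.toList ≠ []) :
    (if PySem.Str.isIn m t then
        (PySem.List.pyGet? ((PySem.Str.splitMax? t m 1).getD []) 0).getD ""
      else t).toList = stepAC t.toList m.toList := by
  unfold stepAC
  cases h : firstOcc m.toList t.toList with
  | none =>
    have : PySem.Chars.isIn m.toList t.toList = false := by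
      apply (PySem.Chars.isIn_eq_false_iff _ _).mpr
      intro hinf
      obtain ⟨j, hj⟩ := (PySem.Chars.exists_prefix_drop_iff_isIn m.toList t.toList).mpr
        ((PySem.Chars.isIn_iff_infix m.toList t.toList).mpr hinf)
      exact (firstOcc_eq_none_iff m.toList t.toList).mp h j hj
    rw [if_neg (by simp [PySem.Str.isIn_eq, this])]
  | some j =>
    obtain ⟨hpre, _⟩ := (firstOcc_eq_some_iff m.toList t.toList j).mp h
    have hin : PySem.Chars.isIn m.toList t.toList = true :=
      (PySem.Chars.exists_prefix_drop_iff_isIn m.toList t.toList).mp ⟨j, hpre⟩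
    rw [if_pos (by simp [PySem.Str.isIn_eq, hin])]
    rw [PySem.Str.splitMax?]
    rw [PySem.Chars.splitMax?]
    rw [if_neg (by simpa using hm)]
    rw [splitOnMax_one t.toList m.toList hm, h]
    simp [PySem.List.pyGet?, PySem.List.pyIdx?]

theorem foldA_toList (ms : List String) :
    ∀ (t : String), (∀ m ∈ ms, m.toList ≠ []) →
    (ms.foldl (fun t m =>
        if PySem.Str.isIn m t then
          (PySem.List.pyGet? ((PySem.Str.splitMax? t m 1).getD []) 0).getD ""
        else t) t).toList
      = (ms.map String.toList).foldl stepAC t.toList := by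
  induction ms with
  | nil => intro t _; rfl
  | cons m ms ih =>
    intro t hms
    simp only [List.foldl_cons, List.map_cons]
    rw [ih _ (fun m' hm' => hms m' (List.mem_cons_of_mem m hm'))]
    rw [stepA_toList t m (hms m List.mem_cons_self)]

/-- The four markers: nonempty, and '\n' occurs exactly at index 0. -/
abbrev nlOnly (m : List Char) : Prop :=
  m ≠ [] ∧ ∀ i, (h : i < m.length) → (m[i] = '\n' ↔ i = 0)

theorem firstOcc_take (t m : List Char) (c : Nat) (hm : nlOnly m) (hc : c ≤ t.length)
    (hnl : ∀ h : c < t.length, t[c] = '\n') :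
    firstOcc m (t.take c) =
      (match firstOcc m t with
        | some j => if j < c then some j else none
        | none => none) := by
  obtain ⟨hm0, hmnl⟩ := hm
  have hmlen : 0 < m.length := List.length_pos_iff.mpr hm0
  -- occurrences inside the prefix are occurrences of t
  have hdown : ∀ i, m <+: (t.take c).drop i → m <+: t.drop i ∧ i + m.length ≤ c := by
    intro i hp
    rw [List.drop_take] at hp
    obtain ⟨hp1, hp2⟩ := List.prefix_take_iff.mp hp
    exact ⟨hp1, by omega⟩
  cases h : firstOcc m t with
  | none =>
    show firstOcc m (t.take c) = none
    apply (firstOcc_eq_none_iff m (t.take c)).mpr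
    intro i hp
    exact (firstOcc_eq_none_iff m t).mp h i (hdown i hp).1
  | some j =>
    show firstOcc m (t.take c) = if j < c then some j else none
    obtain ⟨hpre, hmin⟩ := (firstOcc_eq_some_iff m t j).mp h
    by_cases hjc : j < c
    · rw [if_pos hjc]
      -- the occurrence at j lies entirely inside t.take c
      have hlen : m.length ≤ (t.drop j).length := hpre.length_le
      have hjlen : j + m.length ≤ t.length := by simp at hlen; omega
      have hfit : j + m.length ≤ c := by
        by_contra hgt
        have hk : c - j < m.length := by omega
        have hclen : c < t.length := by omega
        have : m[c - j] = (t.drop j)[c - j]'(by simpa using by omega) :=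
          hpre.getElem hk
        rw [List.getElem_drop] at this
        have hceq : j + (c - j) = c := by omega
        have : m[c - j]'hk = '\n' := by
          rw [this]; simp only [hceq]
          · exact hnl hclen
        have := (hmnl (c - j) hk).mp this
        omega
      apply (firstOcc_eq_some_iff m (t.take c) j).mpr
      constructor
      · rw [List.drop_take]
        exact List.prefix_take_iff.mpr ⟨hpre, by omega⟩
      · intro i hi hp
        exact hmin i hi (hdown i hp).1
    · rw [if_neg hjc]
      apply (firstOcc_eq_none_iff m (t.take c)).mpr
      intro i hp
      obtain ⟨hp1, hp2⟩ := hdown i hp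
      exact hmin i (by omega) hp1

theorem loop_eq (t : List Char) :
    ∀ (ms : List (List Char)), (∀ m ∈ ms, nlOnly m) →
    ∀ (c : Nat), c ≤ t.length → (∀ h : c < t.length, t[c] = '\n') →
    ms.foldl stepAC (t.take c) = t.take (ms.foldl (stepN t) c) := by
  intro ms
  induction ms with
  | nil => intro _ c _ _; rfl
  | cons m ms ih =>
    intro hms c hc hnl
    have hm := hms m List.mem_cons_self
    simp only [List.foldl_cons]
    have hstep : stepAC (t.take c) m = t.take (stepN t c m) := by
      unfold stepAC stepN
      rw [firstOcc_take t m c hm hc hnl]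
      cases h : firstOcc m t with
      | none => rfl
      | some j =>
        show (match (if j < c then some j else none) with
              | some j => (t.take c).take j
              | none => t.take c) = t.take (if j < c then j else c)
        by_cases hjc : j < c
        · rw [if_pos hjc, if_pos hjc]
          show (t.take c).take j = t.take j
          rw [List.take_take, Nat.min_eq_left (by omega)]
        · rw [if_neg hjc, if_neg hjc]
    rw [hstep]
    apply ih (fun m' hm' => hms m' (List.mem_cons_of_mem m hm'))
    · -- new cut still ≤ length
      unfold stepN
      cases h : firstOcc m t with
      | none => exact hc
      | some j =>
        obtain ⟨hpre, _⟩ := (firstOcc_eq_some_iff m t j).mp h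
        have hlen : m.length ≤ (t.drop j).length := hpre.length_le
        have hm0 : 0 < m.length := List.length_pos_iff.mpr hm.1
        simp at hlen
        show (if j < c then j else c) ≤ t.length
        split_ifs <;> omega
    · -- new cut is t.length or points at '\n'
      unfold stepN
      cases h : firstOcc m t with
      | none => exact hnl
      | some j =>
        obtain ⟨hpre, _⟩ := (firstOcc_eq_some_iff m t j).mp h
        have hlen : m.length ≤ (t.drop j).length := hpre.length_le
        have hm0 : 0 < m.length := List.length_pos_iff.mpr hm.1
        show ∀ h : (if j < c then j else c) < t.length, t[if j < c then j else c] = '\n'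
        by_cases hjc : j < c
        · simp only [if_pos hjc]
          intro hj
          have : m[0] = (t.drop j)[0]'(by omega) := hpre.getElem hm0
          rw [List.getElem_drop] at this
          have hm00 : m[0]'hm0 = '\n' := (hm.2 0 hm0).mpr rfl
          rw [hm00] at this
          simpa using this.symm
        · simp only [if_neg hjc]
          exact hnl

-- ----- B-side: the single scan finds the least index at which any marker occurs -----

/-- The markers of A's loop, as char lists. -/
def pvMarkersL : List (List Char) :=
  (["\nNext step I will", "\nObservation:", "\nAction:", "\nTool:"] : List String).map String.toList

/-- Some marker occurs in `t` at index `i`. -/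
def PAt (t : List Char) (i : Nat) : Prop := ∃ m ∈ pvMarkersL, m <+: t.drop i

theorem cond_iff (c : Char) (rest : List Char) :
    (c = '\n' && pvStops.any (fun s => s.toList.isPrefixOf rest)) = true ↔ PAt (c :: rest) 0 := by
  have e1 : "\nNext step I will".toList = '\n' :: "Next step I will".toList := rfl
  have e2 : "\nObservation:".toList = '\n' :: "Observation:".toList := rfl
  have e3 : "\nAction:".toList = '\n' :: "Action:".toList := rfl
  have e4 : "\nTool:".toList = '\n' :: "Tool:".toList := rfl
  unfold PAt pvMarkersL pvStops
  simp [e1, e2, e3, e4, List.cons_prefix_cons, List.isPrefixOf_iff_prefix]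
  tauto

theorem PAt_cons_succ (c : Char) (rest : List Char) (i : Nat) :
    PAt (c :: rest) (i + 1) ↔ PAt rest i := by
  unfold PAt
  simp [List.drop_succ_cons]

theorem scanCut_spec (t : List Char) :
    scanCut t ≤ t.length ∧ (∀ i < scanCut t, ¬ PAt t i)
      ∧ (scanCut t = t.length ∨ PAt t (scanCut t)) := by
  induction t with
  | nil =>
    refine ⟨by simp [scanCut], fun i hi => absurd hi (by simp [scanCut]), Or.inl (by simp [scanCut])⟩
  | cons c rest ih =>
    obtain ⟨ih1, ih2, ih3⟩ := ih
    by_cases h : (c = '\n' && pvStops.any (fun s => s.toList.isPrefixOf rest)) = true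
    · have h0 : scanCut (c :: rest) = 0 := by simp [scanCut, h]
      exact ⟨by omega, fun i hi => by omega, Or.inr (h0 ▸ (cond_iff c rest).mp h)⟩
    · have h0 : scanCut (c :: rest) = scanCut rest + 1 := by simp [scanCut, h]
      refine ⟨by simp [h0]; omega, ?_, ?_⟩
      · intro i hi
        match i with
        | 0 => exact fun hp => h ((cond_iff c rest).mpr hp)
        | i' + 1 =>
          rw [PAt_cons_succ]
          exact ih2 i' (by omega)
      · rcases ih3 with h3 | h3
        · exact Or.inl (by simp [h0, h3])
        · exact Or.inr (by rw [h0, PAt_cons_succ]; exact h3)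

theorem foldStepN_spec (t : List Char) :
    ∀ (ms : List (List Char)), (∀ m ∈ ms, m ≠ []) → ∀ (c : Nat), c ≤ t.length →
    ms.foldl (stepN t) c ≤ t.length
      ∧ (∀ i < ms.foldl (stepN t) c, i < c ∧ ∀ m ∈ ms, ¬ m <+: t.drop i)
      ∧ (ms.foldl (stepN t) c = c ∨ ∃ m ∈ ms, m <+: t.drop (ms.foldl (stepN t) c)) := by
  intro ms
  induction ms with
  | nil => intro _ c hc; exact ⟨hc, fun i hi => ⟨hi, by simp⟩, Or.inl rfl⟩
  | cons m ms ih =>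
    intro hne c hc
    have hm0 : m ≠ [] := hne m List.mem_cons_self
    simp only [List.foldl_cons]
    have hc' : stepN t c m ≤ c ∧ stepN t c m ≤ t.length ∧
        (∀ i < stepN t c m, ¬ m <+: t.drop i) ∧
        (stepN t c m = c ∨ m <+: t.drop (stepN t c m)) := by
      cases h : firstOcc m t with
      | none =>
        have hs : stepN t c m = c := by simp [stepN, h]
        rw [hs]
        exact ⟨le_refl c, hc, fun i _ => (firstOcc_eq_none_iff m t).mp h i, Or.inl rfl⟩
      | some j =>
        obtain ⟨hpre, hmin⟩ := (firstOcc_eq_some_iff m t j).mp h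
        have hlen : m.length ≤ (t.drop j).length := hpre.length_le
        have hml : 0 < m.length := List.length_pos_iff.mpr hm0
        simp only [List.length_drop] at hlen
        have hs : stepN t c m = if j < c then j else c := by simp [stepN, h]
        rw [hs]
        by_cases hjc : j < c
        · rw [if_pos hjc]
          exact ⟨by omega, by omega, fun i hi => hmin i hi, Or.inr hpre⟩
        · rw [if_neg hjc]
          exact ⟨le_refl c, hc, fun i hi => hmin i (by omega), Or.inl rfl⟩
    obtain ⟨h1, h2, h3, h4⟩ := hc'
    obtain ⟨ih1, ih2, ih3⟩ := ih (fun m' hm' => hne m' (List.mem_cons_of_mem m hm')) (stepN t c m) h2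
    refine ⟨ih1, ?_, ?_⟩
    · intro i hi
      obtain ⟨hi1, hi2⟩ := ih2 i hi
      refine ⟨by omega, ?_⟩
      intro m' hm'
      rcases List.mem_cons.mp hm' with rfl | hm'
      · exact h3 i hi1
      · exact hi2 m' hm'
    · rcases ih3 with he | ⟨m', hm', hp⟩
      · rcases h4 with h4 | h4
        · exact Or.inl (by rw [he, h4])
        · exact Or.inr ⟨m, List.mem_cons_self, by rw [he]; exact h4⟩
      · exact Or.inr ⟨m', List.mem_cons_of_mem m hm', hp⟩

/-- The two cut indices characterise the same least position, hence coincide. -/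
theorem cut_unique (t : List Char) (c1 c2 : Nat)
    (h1a : c1 ≤ t.length) (h1b : ∀ i < c1, ¬ PAt t i) (h1c : c1 = t.length ∨ PAt t c1)
    (h2a : c2 ≤ t.length) (h2b : ∀ i < c2, ¬ PAt t i) (h2c : c2 = t.length ∨ PAt t c2) :
    c1 = c2 := by
  rcases Nat.lt_trichotomy c1 c2 with h | h | h
  · rcases h1c with rfl | hp
    · omega
    · exact absurd hp (h2b c1 h)
  · exact h
  · rcases h2c with rfl | hp
    · omega
    · exact absurd hp (h1b c2 h)

-- ===== VERDICT (by name: the statement is the Claim_ definition above) =====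
theorem extract_react_thought_py_spec : Claim_equal_extract_react_thought_py := by
  intro content _
  unfold Spec_extract_react_thought_py
  simp only [extract_react_thought_py, extract_react_thought_py_alt]
  by_cases hin : PySem.Chars.isIn "Thought:".toList content.toList
  case neg =>
    -- "Thought:" not in content: both return ""
    have hfind : PySem.Str.find content "Thought:" = -1 := by
      rw [PySem.Str.find_eq]
      exact (PySem.Chars.find_eq_neg_one_iff _ _).mpr
        (fun hinf => hin ((PySem.Chars.isIn_iff_infix _ _).mpr hinf))
    have hb : PySem.Chars.isIn "Thought:".toList content.toList = false :=
      Bool.eq_false_iff.mpr hin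
    have hcond : (content = "" || !(PySem.Str.isIn "Thought:" content)) = true := by
      simp [PySem.Str.isIn_eq]
      exact Or.inr hb
    rw [hfind, if_pos hcond, if_pos rfl]
  case pos =>
    -- "Thought:" occurs; let j be its first index
    have hne : content ≠ "" := by
      intro h
      rw [h] at hin
      exact absurd hin (by decide)
    obtain ⟨j, hj⟩ : ∃ j, firstOcc "Thought:".toList content.toList = some j := by
      cases h : firstOcc "Thought:".toList content.toList with
      | none =>
        obtain ⟨i, hi⟩ := (PySem.Chars.exists_prefix_drop_iff_isIn _ _).mpr hin
        exact absurd hi ((firstOcc_eq_none_iff _ _).mp h i)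
      | some j => exact ⟨j, rfl⟩
    have hfind : PySem.Str.find content "Thought:" = (j : Int) := by
      rw [PySem.Str.find_eq, find_eq_firstOcc, hj]
    rw [if_neg (by simp [PySem.Str.isIn_eq, hne]; exact hin), if_neg (by rw [hfind]; omega)]
    -- the two tails coincide
    have htails :
        ((PySem.List.pyGet? ((PySem.Str.splitMax? content "Thought:" 1).getD []) 1).getD "").toList
          = (PySem.Str.slice content (some (PySem.Str.find content "Thought:" + PySem.Str.len "Thought:")) none).toList := by
      rw [PySem.Str.splitMax?, PySem.Chars.splitMax?, if_neg (by decide),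
        splitOnMax_one _ _ (by decide), hj]
      rw [hfind, PySem.Str.slice]
      simp only [PySem.Str.len, PySem.Chars.slice_eq_listSlice]
      rw [PySem.List.slice_from _ (by positivity)]
      simp [PySem.List.pyGet?, PySem.List.pyIdx?]
      omega
    set tailA : String := (PySem.List.pyGet? ((PySem.Str.splitMax? content "Thought:" 1).getD []) 1).getD "" with htA
    set tailB : String := PySem.Str.slice content (some (PySem.Str.find content "Thought:" + PySem.Str.len "Thought:")) none with htB
    have htail : tailA = tailB := String.toList_inj.mp htails
    rw [htail]
    set t : List Char := tailB.toList with ht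
    apply String.toList_inj.mp
    rw [PySem.Str.toList_strip, PySem.Str.toList_strip]
    -- A's marker loop = take at the fold of stepN
    have hmarkers : ∀ m ∈ (["\nNext step I will", "\nObservation:", "\nAction:", "\nTool:"] : List String), m.toList ≠ [] := by decide
    have hnlOnly : ∀ m ∈ pvMarkersL, nlOnly m := by decide
    rw [foldA_toList _ tailB hmarkers]
    rw [show ((["\nNext step I will", "\nObservation:", "\nAction:", "\nTool:"] : List String).map String.toList) = pvMarkersL from rfl]
    have hA := loop_eq t pvMarkersL hnlOnly t.length (le_refl _) (fun h => absurd h (by omega))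
    rw [List.take_length] at hA
    rw [hA]
    -- the fold's cut equals B's scan cut
    have hms : ∀ m ∈ pvMarkersL, m ≠ [] := fun m hm => (hnlOnly m hm).1
    obtain ⟨f1, f2, f3⟩ := foldStepN_spec t pvMarkersL hms t.length (le_refl _)
    obtain ⟨s1, s2, s3⟩ := scanCut_spec t
    have hcut : pvMarkersL.foldl (stepN t) t.length = scanCut t := by
      apply cut_unique t _ _ f1
      · intro i hi
        exact fun ⟨m, hm, hp⟩ => (f2 i hi).2 m hm hp
      · rcases f3 with he | hex
        · exact Or.inl he
        · exact Or.inr hex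
      · exact s1
      · exact s2
      · exact s3
    rw [hcut]
    -- B's slice is the same take
    simp only [PySem.Str.slice, String.toList_ofList, PySem.Chars.slice_eq_listSlice]
    rw [PySem.List.slice_to _ (by omega)]
    simp [ht]
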